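-- pv_equiv track=rewrite | github.com/arthurnunesc/daily-byte-solutions | week-one/day3-vacuum_cleaner_route.py | check_initial_position
-- ===== SOURCE A (Python) =====
-- def check_initial_position(moves):
--     x = 0
--     y = 0
--     split_moves = list(moves)
--     for move in split_moves:
--         if move == "L":
--             x -= 1
--         elif move == "R":
--             x += 1
--         elif move == "D":
--             y -= 1
--         elif move == "U":
--             y += 1
--
--     if x == 0 and y == 0:
--         return True
--     else:
--         return False
-- ===== SOURCE B (Python) =====
-- def check_initial_position(moves):
--     freq = {}
--     for ch in moves:
--         freq[ch] = freq.get(ch, 0) + 1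
--     return freq.get("L", 0) == freq.get("R", 0) and freq.get("U", 0) == freq.get("D", 0)
-- ===== Notes on version B (the rewrite author's own statement) =====
-- stated objective: alternative
-- what changed: Replaces the signed x/y accumulator with its four-way if/elif branching by a branch-free frequency table built in one pass, returning the two-pair count equality L==R and U==D.
import Mathlib
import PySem

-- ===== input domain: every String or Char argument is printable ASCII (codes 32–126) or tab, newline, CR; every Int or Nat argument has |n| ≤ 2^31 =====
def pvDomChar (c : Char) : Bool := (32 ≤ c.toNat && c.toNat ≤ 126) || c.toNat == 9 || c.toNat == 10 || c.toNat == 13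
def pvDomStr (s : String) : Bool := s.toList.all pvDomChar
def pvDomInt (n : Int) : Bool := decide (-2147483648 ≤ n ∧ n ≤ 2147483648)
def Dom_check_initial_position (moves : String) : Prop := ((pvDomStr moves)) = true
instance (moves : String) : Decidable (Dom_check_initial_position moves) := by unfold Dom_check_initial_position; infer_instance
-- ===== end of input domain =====

-- B: one-pass frequency table (dict) + count equality instead of a branching signed accumulator; same values everywhere.
-- ===== PORT A =====
def check_initial_position (moves : String) : Bool :=
  let split_moves := moves.toList
  let p : Int × Int := split_moves.foldl (fun s move =>
    if move == 'L' then (s.1 - 1, s.2)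
    else if move == 'R' then (s.1 + 1, s.2)
    else if move == 'D' then (s.1, s.2 - 1)
    else if move == 'U' then (s.1, s.2 + 1)
    else s) (0, 0)
  if p.1 = 0 ∧ p.2 = 0 then true else false

-- ===== PORT B =====
def check_initial_position_alt (moves : String) : Bool :=
  let freq : PySem.Dict Char Int :=
    moves.toList.foldl (fun d ch => d.insert ch (d.getD ch 0 + 1)) PySem.Dict.empty
  (freq.getD 'L' 0 == freq.getD 'R' 0) && (freq.getD 'U' 0 == freq.getD 'D' 0)

-- ===== PRECONDITION & SPEC =====
def Spec_check_initial_position (moves : String) (out : Bool) : Prop := out = check_initial_position_alt moves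
instance (moves : String) (out : Bool) : Decidable (Spec_check_initial_position moves out) := by unfold Spec_check_initial_position; infer_instance

-- ===== CLAIM (what is proved, stated in full; the proofs are below) =====
def Claim_equal_check_initial_position : Prop := ∀ (moves : String), Dom_check_initial_position moves → Spec_check_initial_position moves (check_initial_position moves)

-- ===== LEMMAS AND PROOFS =====

lemma pvA_invariant (l : List Char) (x y : Int) :
    l.foldl (fun (s : Int × Int) move =>
      if move == 'L' then (s.1 - 1, s.2)
      else if move == 'R' then (s.1 + 1, s.2)
      else if move == 'D' then (s.1, s.2 - 1)
      else if move == 'U' then (s.1, s.2 + 1)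
      else s) (x, y)
    = (x + (l.count 'R' : Int) - (l.count 'L' : Int),
       y + (l.count 'U' : Int) - (l.count 'D' : Int)) := by
  induction l generalizing x y with
  | nil => simp
  | cons c t ih =>
    rw [List.foldl_cons]
    simp only [beq_iff_eq] at ih ⊢
    by_cases hL : c = 'L'
    · subst hL
      rw [if_pos rfl, ih]
      simp [Prod.mk.injEq]
      omega
    · by_cases hR : c = 'R'
      · subst hR
        rw [if_neg (by decide), if_pos rfl, ih]
        simp [Prod.mk.injEq]
        omega
      · by_cases hD : c = 'D'
        · subst hD
          rw [if_neg (by decide), if_neg (by decide), if_pos rfl, ih]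
          simp [Prod.mk.injEq]
          omega
        · by_cases hU : c = 'U'
          · subst hU
            rw [if_neg (by decide), if_neg (by decide), if_neg (by decide), if_pos rfl, ih]
            simp [Prod.mk.injEq]
            omega
          · rw [if_neg hL, if_neg hR, if_neg hD, if_neg hU, ih]
            simp [hL, hR, hD, hU]

-- ===== VERDICT (by name: the statement is the Claim_ definition above) =====
theorem check_initial_position_spec : Claim_equal_check_initial_position := by
  intro moves _
  unfold Spec_check_initial_position check_initial_position check_initial_position_alt
  simp only [pvA_invariant, PySem.Dict.getD_foldl_insert_add_one, PySem.Dict.getD_empty, zero_add]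
  split_ifs with h <;> symm
  · rw [Bool.and_eq_true]
    simp only [beq_iff_eq]
    omega
  · rw [not_and_or] at h
    rcases h with h | h <;>
    · rw [Bool.and_eq_false_iff]
      simp only [beq_eq_false_iff_ne, ne_eq]
      omega
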